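-- pv_equiv track=rewrite | github.com/Vidhu-sri/CompetitiveProgramming | icpsc_prac/Practice/DecimalString.py | solve
-- ===== SOURCE A (Python) =====
-- from collections import deque
--
-- def solve(s):
--     n = len(s)
--     ans = [[-1] * 10 for _ in range(10)]
--
--     for x in range(10):
--         for y in range(10):
--             # dist[pos][digit] = min insertions to reach pos in s with current digit
--             dist = [[-1] * 10 for _ in range(n)]
--             q = deque()
--
--             # Start from 0
--             if int(s[0]) != 0:
--                 continue  # impossible start
--             dist[0][0] = 0
--             q.append((0, 0))  # (position in s, last digit)
--
--             while q:
--                 pos, digit = q.popleft()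
--
--                 for step in [x, y]:
--                     next_digit = (digit + step) % 10
--                     if pos + 1 < n and int(s[pos + 1]) == next_digit:
--                         if dist[pos + 1][next_digit] == -1:
--                             dist[pos + 1][next_digit] = dist[pos][digit]
--                             q.appendleft((pos + 1, next_digit))  # 0-cost move
--                     if dist[pos][next_digit] == -1:
--                         dist[pos][next_digit] = dist[pos][digit] + 1
--                         q.append((pos, next_digit))  # insertion
--
--             # Get min cost to reach the last position
--             best = -1
--             for d in range(10):
--                 if dist[n - 1][d] != -1:
--                     if best == -1 or dist[n - 1][d] < best:
--                         best = dist[n - 1][d]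
--             ans[x][y] = best
--
--     return ans
-- ===== SOURCE B (Python) =====
-- def opt_min(u, v):
--     if u is None:
--         return v
--     if v is None:
--         return u
--     return u if u <= v else v
--
--
-- def steps_table(x, y):
--     # m[a][b] = least number of +x / +y steps (mod 10) taking digit a to digit b, or None
--     m = [[0 if a == b else None for b in range(10)] for a in range(10)]
--     for _ in range(10):
--         m = [[0 if a == b
--               else opt_min(None if m[a][(b - x) % 10] is None else m[a][(b - x) % 10] + 1,
--                            None if m[a][(b - y) % 10] is None else m[a][(b - y) % 10] + 1)
--               for b in range(10)] for a in range(10)]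
--     return m
--
--
-- def solve(s):
--     n = len(s)
--     if int(s[0]) != 0:
--         return [[-1] * 10 for _ in range(10)]
--     digs = [int(c) for c in s]
--     ans = []
--     for x in range(10):
--         row = []
--         for y in range(10):
--             m = steps_table(x, y)
--             total = 0
--             for p in range(1, n):
--                 t = opt_min(m[digs[p - 1]][(digs[p] - x) % 10],
--                             m[digs[p - 1]][(digs[p] - y) % 10])
--                 if t is None:
--                     total = None
--                     break
--                 total += t
--             row.append(-1 if total is None else total)
--         ans.append(row)
--     return ans
-- ===== Notes on version B (the rewrite author's own statement) =====
-- stated objective: faster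
-- what changed: A runs a 0-1 BFS with a deque over the whole n×10 (position, digit) state space for each of the 100 (x,y) pairs; B instead precomputes a 10×10 table of minimal +x/+y (mod 10) step counts between digits by bounded relaxation and then does a single linear forward pass over the string per pair.
import Mathlib
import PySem

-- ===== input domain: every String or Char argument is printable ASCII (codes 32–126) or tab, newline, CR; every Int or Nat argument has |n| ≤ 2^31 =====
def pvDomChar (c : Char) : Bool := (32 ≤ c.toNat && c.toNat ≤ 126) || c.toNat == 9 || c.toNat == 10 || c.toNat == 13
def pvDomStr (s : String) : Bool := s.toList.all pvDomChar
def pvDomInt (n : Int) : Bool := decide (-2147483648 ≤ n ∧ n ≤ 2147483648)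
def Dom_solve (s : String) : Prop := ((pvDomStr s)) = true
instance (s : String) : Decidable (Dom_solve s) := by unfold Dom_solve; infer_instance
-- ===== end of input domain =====

-- B replaces A's per-pair 0-1 BFS over the whole (position × digit) state space by a precomputed
-- 10×10 per-digit step-distance table plus one linear forward pass per pair (objective: faster, constant factor).

-- int(s[i]) for one character: exact on the digit characters admitted by Pre_solve
-- (out-of-range index / non-digit character would raise in Python; Pre_solve excludes exactly those inputs).
def digAt (s : String) (i : Nat) : Int :=
  match PySem.Str.pyGet? s (i : Int) with
  | none => 0
  | some c => (PySem.Int.ofChars? [c]).getD 0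

-- ===== PORT A =====
-- dist is the n×10 array dist[pos][digit] (-1 = unset), kept as a function
def upd2 (f : Nat → Nat → Int) (p e : Nat) (v : Int) : Nat → Nat → Int :=
  fun p' e' => if p' = p ∧ e' = e then v else f p' e'

-- `if pos + 1 < n and int(s[pos + 1]) == next_digit: ...` (the 0-cost move)
def relax0 (s : String) (n pos digit st : Nat)
    (dq : (Nat → Nat → Int) × List (Nat × Nat)) : (Nat → Nat → Int) × List (Nat × Nat) :=
  if pos + 1 < n ∧ digAt s (pos + 1) = (((digit + st) % 10 : Nat) : Int) then
    if dq.1 (pos + 1) ((digit + st) % 10) = -1 then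
      (upd2 dq.1 (pos + 1) ((digit + st) % 10) (dq.1 pos digit), (pos + 1, (digit + st) % 10) :: dq.2)
    else dq
  else dq

-- `if dist[pos][next_digit] == -1: ...` (the insertion)
def relax1 (pos digit st : Nat)
    (dq : (Nat → Nat → Int) × List (Nat × Nat)) : (Nat → Nat → Int) × List (Nat × Nat) :=
  if dq.1 pos ((digit + st) % 10) = -1 then
    (upd2 dq.1 pos ((digit + st) % 10) (dq.1 pos digit + 1), dq.2 ++ [(pos, (digit + st) % 10)])
  else dq

-- body of `for step in [x, y]`
def doStep (s : String) (n pos digit st : Nat)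
    (dq : (Nat → Nat → Int) × List (Nat × Nat)) : (Nat → Nat → Int) × List (Nat × Nat) :=
  relax1 pos digit st (relax0 s n pos digit st dq)

-- `while q:` — fuel 10*n+1 provably suffices (each state is enqueued at most once)
def bfs (s : String) (n x y : Nat) : Nat → (Nat → Nat → Int) → List (Nat × Nat) → (Nat → Nat → Int)
  | 0, dist, _ => dist
  | _ + 1, dist, [] => dist
  | f + 1, dist, (pos, digit) :: rest =>
      let dq := doStep s n pos digit y (doStep s n pos digit x (dist, rest))
      bfs s n x y f dq.1 dq.2

def bestLoop (dist : Nat → Nat → Int) (n : Nat) : Int :=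
  (List.range 10).foldl
    (fun best e => if dist (n - 1) e ≠ -1 ∧ (best = -1 ∨ dist (n - 1) e < best) then dist (n - 1) e else best)
    (-1)

def pairAns (s : String) (n x y : Nat) : Int :=
  if digAt s 0 ≠ 0 then -1
  else
    let dist := bfs s n x y (10 * n + 1) (upd2 (fun _ _ => -1) 0 0 0) [(0, 0)]
    bestLoop dist n

def solve (s : String) : List (List Int) :=
  let n := s.toList.length
  (List.range 10).map (fun x => (List.range 10).map (fun y => pairAns s n x y))

-- ===== PORT B =====
def optMin : Option Int → Option Int → Option Int
  | none, v => v
  | some u, none => some u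
  | some u, some w => if u ≤ w then some u else some w

-- `None if o is None else o + 1`
def bump : Option Int → Option Int
  | none => none
  | some v => some (v + 1)

def tget (m : List (List (Option Int))) (a b : Nat) : Option Int := (m.getD a []).getD b none

-- Python (b - st) % 10 as a list index
def subMod10 (b st : Nat) : Nat := (PySem.Int.mod ((b : Int) - (st : Int)) 10).toNat

def stepsTable (x y : Nat) : List (List (Option Int)) :=
  let m0 := (List.range 10).map (fun a => (List.range 10).map (fun b => if a = b then some (0 : Int) else none))
  (List.range 10).foldl
    (fun m _ =>
      (List.range 10).map (fun a => (List.range 10).map (fun b =>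
        if a = b then some (0 : Int)
        else optMin (bump (tget m a (subMod10 b x))) (bump (tget m a (subMod10 b y))))))
    m0

def solve_alt (s : String) : List (List Int) :=
  let n := s.toList.length
  if digAt s 0 ≠ 0 then (List.range 10).map (fun _ => (List.range 10).map (fun _ => (-1 : Int)))
  else
    let digs : List Int := s.toList.map (fun c => (PySem.Int.ofChars? [c]).getD 0)
    (List.range 10).map (fun x => (List.range 10).map (fun y =>
      let m := stepsTable x y
      let total :=
        (PySem.List.pyRange 1 (n : Int) 1).foldl
          (fun (acc : Option Int) (p : Int) =>
            match acc with
            | none => none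
            | some c =>
              match optMin
                  (tget m (digs.getD (p - 1).toNat 0).toNat
                    ((PySem.Int.mod (digs.getD p.toNat 0 - (x : Int)) 10).toNat))
                  (tget m (digs.getD (p - 1).toNat 0).toNat
                    ((PySem.Int.mod (digs.getD p.toNat 0 - (y : Int)) 10).toNat)) with
              | none => none
              | some t => some (c + t))
          (some 0)
      match total with
      | none => -1
      | some c => c))

-- ===== PRECONDITION & SPEC =====
-- Pre_solve admits exactly the inputs on which the Python A returns normally: s nonempty with a digit
-- first character, and (when that first character is '0', so that the BFS actually runs) every
-- character a digit.  Outside Pre_solve A raises IndexError (empty s) or ValueError (int of a non-digit).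
def Pre_solve (s : String) : Prop :=
  s.toList ≠ [] ∧ (s.toList.headD ' ').isDigit = true ∧
    ((s.toList.headD ' ') = '0' → s.toList.all (fun c => c.isDigit) = true)
instance (s : String) : Decidable (Pre_solve s) := by unfold Pre_solve; infer_instance

def pvWitness_solve : String := "00121"

def Spec_solve (s : String) (out : List (List Int)) : Prop := out = solve_alt s
instance (s : String) (out : List (List Int)) : Decidable (Spec_solve s out) := by unfold Spec_solve; infer_instance

-- ===== CLAIM (what is proved, stated in full; the proofs are below) =====
def Claim_equal_solve : Prop := ∀ (s : String), Dom_solve s → Pre_solve s → Spec_solve s (solve s)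

-- ===== LEMMAS AND PROOFS =====

abbrev PProp (x y a b j : Nat) : Prop := ∃ i < j + 1, (a + i * x + (j - i) * y) % 10 = b

lemma P_zero {x y a b : Nat} (h : PProp x y a b 0) : a % 10 = b := by
  obtain ⟨i, hi, he⟩ := h
  interval_cases i
  simpa using he

lemma P_refl (x y : Nat) {a : Nat} (ha : a < 10) : PProp x y a a 0 :=
  ⟨0, by omega, by simpa using Nat.mod_eq_of_lt ha⟩

lemma P_lt10 {x y a b j : Nat} (h : PProp x y a b j) : b < 10 := by
  obtain ⟨i, hi, he⟩ := h; omega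

lemma P_ext {x y a b j st : Nat} (h : PProp x y a b j) (hst : st = x ∨ st = y) :
    PProp x y a ((b + st) % 10) (j + 1) := by
  obtain ⟨i, hi, he⟩ := h
  rcases hst with rfl | rfl
  · refine ⟨i + 1, by omega, ?_⟩
    have h1 : j + 1 - (i + 1) = j - i := by omega
    rw [h1, Nat.succ_mul]
    omega
  · refine ⟨i, by omega, ?_⟩
    have h1 : j + 1 - i = (j - i) + 1 := by omega
    rw [h1, Nat.succ_mul]
    omega

lemma P_dec {x y a b j : Nat} (h : PProp x y a b (j + 1)) :
    ∃ st, (st = x ∨ st = y) ∧ ∃ b', b = (b' + st) % 10 ∧ PProp x y a b' j := by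
  obtain ⟨i, hi, he⟩ := h
  rcases Nat.eq_zero_or_pos i with rfl | hpos
  · refine ⟨y, Or.inr rfl, (a + 0 * x + (j - 0) * y) % 10, ?_, ⟨0, by omega, rfl⟩⟩
    have h1 : j + 1 - 0 = (j - 0) + 1 := by omega
    rw [h1, Nat.succ_mul] at he
    omega
  · refine ⟨x, Or.inl rfl, (a + (i - 1) * x + (j - (i - 1)) * y) % 10, ?_, ⟨i - 1, by omega, rfl⟩⟩
    have h1 : i * x = (i - 1) * x + x := by
      conv_lhs => rw [show i = (i - 1) + 1 by omega]
      rw [Nat.succ_mul]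
    have h2 : j + 1 - i = j - (i - 1) := by omega
    rw [h1, h2] at he
    omega

lemma P_cut {x y a b j : Nat} (hj : 10 ≤ j) (h : PProp x y a b j) :
    ∃ j' < j, PProp x y a b j' := by
  obtain ⟨i, hi, he⟩ := h
  have key : ∀ r t : Nat, r < t → t < j + 1 →
      (min r i * x + (r - i) * y) % 10 = (min t i * x + (t - i) * y) % 10 →
      ∃ j' < j, PProp x y a b j' := by
    intro r t hrt ht heq
    set c := min t i - min r i with hc
    set e := (t - i) - (r - i) with he'
    have hu : min t i = min r i + c := by omega
    have hv : t - i = (r - i) + e := by omega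
    have hce : 1 ≤ c + e := by omega
    have hcx : min t i * x = min r i * x + c * x := by rw [hu, Nat.add_mul]
    have hey : (t - i) * y = (r - i) * y + e * y := by rw [hv, Nat.add_mul]
    have hw : (c * x + e * y) % 10 = 0 := by
      rw [hcx, hey] at heq
      omega
    have hci : c ≤ i := by omega
    have hej : e ≤ j - i := by omega
    refine ⟨j - (c + e), by omega, ⟨i - c, by omega, ?_⟩⟩
    have d1 : i * x = (i - c) * x + c * x := by
      conv_lhs => rw [show i = (i - c) + c by omega]
      rw [Nat.add_mul]
    have d2 : (j - i) * y = ((j - (c + e)) - (i - c)) * y + e * y := by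
      conv_lhs => rw [show j - i = ((j - (c + e)) - (i - c)) + e by omega]
      rw [Nat.add_mul]
    rw [d1, d2] at he
    omega
  obtain ⟨r, hr, t, ht, hne, heq⟩ :=
    Finset.exists_ne_map_eq_of_card_lt_of_maps_to
      (s := Finset.range (j + 1)) (t := Finset.range 10)
      (f := fun t => (min t i * x + (t - i) * y) % 10)
      (by simp; omega) (by intro t _; simp; omega)
  simp only [Finset.mem_range] at hr ht
  rcases lt_or_gt_of_ne hne with hlt | hgt
  · exact key r t hlt ht heq
  · exact key t r hgt hr heq.symm

noncomputable def mdist (x y a b : Nat) : Option Nat :=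
  @dite _ (∃ j, PProp x y a b j) (Classical.propDecidable _) (fun h => some (Nat.find h)) (fun _ => none)

lemma mdist_spec {x y a b j : Nat} (h : mdist x y a b = some j) :
    PProp x y a b j ∧ ∀ j' < j, ¬ PProp x y a b j' := by
  unfold mdist at h
  by_cases hex : ∃ j, PProp x y a b j
  · rw [dif_pos hex] at h
    cases h
    exact ⟨Nat.find_spec hex, fun j' hj' => Nat.find_min hex hj'⟩
  · rw [dif_neg hex] at h; cases h

lemma mdist_of_P {x y a b j : Nat} (h : PProp x y a b j) :
    ∃ j' ≤ j, mdist x y a b = some j' := by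
  unfold mdist
  have hex : ∃ j', PProp x y a b j' := ⟨j, h⟩
  rw [dif_pos hex]
  exact ⟨_, Nat.find_min' _ h, rfl⟩

lemma mdist_self (x y : Nat) {a : Nat} (ha : a < 10) : mdist x y a a = some 0 := by
  obtain ⟨j', hj', h⟩ := mdist_of_P (P_refl x y ha)
  rwa [Nat.le_zero.mp hj'] at h

lemma mdist_eq_zero {x y a b : Nat} (ha : a < 10) (h : mdist x y a b = some 0) : b = a := by
  have := (mdist_spec h).1
  have := P_zero this
  omega

lemma mdist_lt10 {x y a b j : Nat} (ha : a < 10) (h : mdist x y a b = some j) : b < 10 := by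
  rcases j with _ | j
  · have := mdist_eq_zero ha h; omega
  · exact P_lt10 (mdist_spec h).1

lemma mdist_le9 {x y a b j : Nat} (h : mdist x y a b = some j) : j ≤ 9 := by
  by_contra hgt
  obtain ⟨hP, hmin⟩ := mdist_spec h
  obtain ⟨j', hj', hP'⟩ := P_cut (by omega) hP
  exact hmin j' hj' hP'

lemma mdist_triangle {x y a b j st : Nat} (hst : st = x ∨ st = y)
    (h : mdist x y a b = some j) :
    ∃ j' ≤ j + 1, mdist x y a ((b + st) % 10) = some j' :=
  mdist_of_P (P_ext (mdist_spec h).1 hst)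

lemma mdist_pred {x y a b j : Nat} (h : mdist x y a b = some (j + 1)) :
    ∃ st, (st = x ∨ st = y) ∧ ∃ b', b = (b' + st) % 10 ∧ mdist x y a b' = some j := by
  obtain ⟨hP, hmin⟩ := mdist_spec h
  obtain ⟨st, hst, b', hb', hPb'⟩ := P_dec hP
  refine ⟨st, hst, b', hb', ?_⟩
  obtain ⟨j', hj', hm⟩ := mdist_of_P hPb'
  rcases Nat.lt_or_ge j' j with hlt | hge
  · exact absurd (hb' ▸ P_ext (mdist_spec hm).1 hst) (hmin (j' + 1) (by omega))
  · rwa [show j' = j by omega] at hm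

def ominN : Option Nat → Option Nat → Option Nat
  | none, v => v
  | some u, none => some u
  | some u, some w => some (min u w)

lemma ominN_cases {u v : Option Nat} {t : Nat} (h : ominN u v = some t) :
    u = some t ∨ v = some t := by
  cases u <;> cases v <;> simp_all [ominN]
  omega

lemma ominN_le {u v : Option Nat} {t : Nat} (h : ominN u v = some t) :
    (∀ w, u = some w → t ≤ w) ∧ (∀ w, v = some w → t ≤ w) := by
  cases u <;> cases v <;> simp_all [ominN] <;> omega

lemma ominN_ne_none {u v : Option Nat} {w : Nat} (hu : u = some w) :
    ∃ t ≤ w, ominN u v = some t := by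
  subst hu; cases v <;> simp [ominN] <;> omega

lemma ominN_ne_none' {u v : Option Nat} {w : Nat} (hv : v = some w) :
    ∃ t ≤ w, ominN u v = some t := by
  subst hv; cases u <;> simp [ominN] <;> omega

def pre10 (b st : Nat) : Nat := (b + 10 - st) % 10

lemma pre10_spec {b st : Nat} (hb : b < 10) (hst : st < 10) : (pre10 b st + st) % 10 = b := by
  unfold pre10; omega

lemma pre10_inv {b st e : Nat} (he : e < 10) (hst : st < 10) (h : (e + st) % 10 = b) :
    pre10 b st = e := by
  unfold pre10; omega

noncomputable def tcost (x y : Nat) (d : Nat → Nat) (p : Nat) : Option Nat :=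
  ominN (mdist x y (d p) (pre10 (d (p + 1)) x)) (mdist x y (d p) (pre10 (d (p + 1)) y))

noncomputable def Bcost (x y : Nat) (d : Nat → Nat) : Nat → Option Nat
  | 0 => some 0
  | p + 1 => (Bcost x y d p).bind (fun c => (tcost x y d p).map (fun t => c + t))

noncomputable def Fv (x y : Nat) (d : Nat → Nat) (p e : Nat) : Option Nat :=
  (Bcost x y d p).bind (fun c => (mdist x y (d p) e).map (fun t => c + t))

lemma Fv_entry {x y : Nat} {d : Nat → Nat} {p : Nat} (hd : d p < 10) :
    Fv x y d p (d p) = Bcost x y d p := by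
  unfold Fv
  rw [mdist_self x y hd]
  cases Bcost x y d p <;> rfl

lemma Fv_some_elim {x y : Nat} {d : Nat → Nat} {p e k : Nat} (h : Fv x y d p e = some k) :
    ∃ c t, Bcost x y d p = some c ∧ mdist x y (d p) e = some t ∧ k = c + t := by
  unfold Fv at h
  cases hB : Bcost x y d p <;> rw [hB] at h
  · cases h
  · cases hm : mdist x y (d p) e <;> rw [hm] at h
    · cases h
    · simp at h
      exact ⟨_, _, rfl, rfl, h.symm⟩

lemma Fv_intro {x y : Nat} {d : Nat → Nat} {p e c t : Nat}
    (hB : Bcost x y d p = some c) (hm : mdist x y (d p) e = some t) :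
    Fv x y d p e = some (c + t) := by
  unfold Fv; rw [hB, hm]; rfl

lemma Bcost_succ_elim {x y : Nat} {d : Nat → Nat} {p c : Nat}
    (h : Bcost x y d (p + 1) = some c) :
    ∃ c' t, Bcost x y d p = some c' ∧ tcost x y d p = some t ∧ c = c' + t := by
  unfold Bcost at h
  cases hB : Bcost x y d p <;> rw [hB] at h
  · cases h
  · cases ht : tcost x y d p <;> rw [ht] at h
    · cases h
    · simp at h
      exact ⟨_, _, rfl, rfl, h.symm⟩

def Edge (n x y : Nat) (d : Nat → Nat) (u : Nat × Nat) (w : Nat) (v : Nat × Nat) : Prop :=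
  ∃ st, (st = x ∨ st = y) ∧
    ((w = 1 ∧ v = (u.1, (u.2 + st) % 10)) ∨
     (w = 0 ∧ u.1 + 1 < n ∧ d (u.1 + 1) = (u.2 + st) % 10 ∧ v = (u.1 + 1, d (u.1 + 1))))

inductive Reach (n x y : Nat) (d : Nat → Nat) : Nat × Nat → Nat → Nat × Nat → Prop
  | refl (u : Nat × Nat) : Reach n x y d u 0 u
  | step {u v z : Nat × Nat} {w k : Nat} :
      Edge n x y d u w v → Reach n x y d v k z → Reach n x y d u (w + k) z

lemma Reach_trans {n x y : Nat} {d : Nat → Nat} {u v z : Nat × Nat} {j k : Nat}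
    (h1 : Reach n x y d u j v) (h2 : Reach n x y d v k z) : Reach n x y d u (j + k) z := by
  induction h1 with
  | refl => simpa using h2
  | step e _ ih =>
      rw [Nat.add_assoc]
      exact Reach.step e (ih h2)

lemma Reach_single {n x y : Nat} {d : Nat → Nat} {u v : Nat × Nat} {w : Nat}
    (h : Edge n x y d u w v) : Reach n x y d u w v := by
  simpa using Reach.step h (Reach.refl v)

lemma Reach_snoc {n x y : Nat} {d : Nat → Nat} {u v z : Nat × Nat} {k w : Nat}
    (h1 : Reach n x y d u k v) (h2 : Edge n x y d v w z) : Reach n x y d u (k + w) z :=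
  Reach_trans h1 (Reach_single h2)

lemma Reach_lift {n x y : Nat} {d : Nat → Nat} {p e k : Nat}
    (hdp : d p < 10) (h : mdist x y (d p) e = some k) :
    Reach n x y d (p, d p) k (p, e) := by
  induction k generalizing e with
  | zero => rw [mdist_eq_zero hdp h]; exact Reach.refl _
  | succ k ih =>
      obtain ⟨st, hst, b', rfl, hm⟩ := mdist_pred h
      exact Reach_snoc (ih hm) ⟨st, hst, Or.inl ⟨rfl, rfl⟩⟩

lemma Bcost_realize {n x y : Nat} {d : Nat → Nat}
    (hx : x < 10) (hy : y < 10) (hd : ∀ i < n, d i < 10) :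
    ∀ p, p < n → ∀ c, Bcost x y d p = some c → Reach n x y d (0, d 0) c (p, d p) := by
  intro p
  induction p with
  | zero =>
      intro _ c hc
      cases hc
      exact Reach.refl _
  | succ p ih =>
      intro hp c hc
      obtain ⟨c', t, hB, ht, rfl⟩ := Bcost_succ_elim hc
      have hdp : d p < 10 := hd p (by omega)
      have hdp1 : d (p + 1) < 10 := hd (p + 1) hp
      have R1 : Reach n x y d (0, d 0) c' (p, d p) := ih (by omega) c' hB
      obtain ⟨st, hst, harm⟩ : ∃ st, (st = x ∨ st = y) ∧
          mdist x y (d p) (pre10 (d (p + 1)) st) = some t := by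
        rcases ominN_cases ht with h | h
        · exact ⟨x, Or.inl rfl, h⟩
        · exact ⟨y, Or.inr rfl, h⟩
      have hst10 : st < 10 := by rcases hst with rfl | rfl <;> assumption
      have R2 : Reach n x y d (p, d p) t (p, pre10 (d (p + 1)) st) := Reach_lift hdp harm
      have E : Edge n x y d (p, pre10 (d (p + 1)) st) 0 (p + 1, d (p + 1)) :=
        ⟨st, hst, Or.inr ⟨rfl, hp, (pre10_spec hdp1 hst10).symm, rfl⟩⟩
      simpa using Reach_trans R1 (Reach_snoc R2 E)

lemma Fv_realize {n x y : Nat} {d : Nat → Nat}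
    (hx : x < 10) (hy : y < 10) (hd : ∀ i < n, d i < 10) {p e k : Nat}
    (hp : p < n) (h : Fv x y d p e = some k) :
    Reach n x y d (0, d 0) k (p, e) := by
  obtain ⟨c, t, hB, hm, rfl⟩ := Fv_some_elim h
  exact Reach_trans (Bcost_realize hx hy hd p hp c hB) (Reach_lift (hd p hp) hm)

-- F is subadditive along 1-edges
lemma Fv_sub1 {x y : Nat} {d : Nat → Nat} {p e k st : Nat}
    (hst : st = x ∨ st = y) (h : Fv x y d p e = some k) :
    ∃ k' ≤ k + 1, Fv x y d p ((e + st) % 10) = some k' := by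
  obtain ⟨c, t, hB, hm, rfl⟩ := Fv_some_elim h
  obtain ⟨t', ht', hm'⟩ := mdist_triangle hst hm
  exact ⟨c + t', by omega, Fv_intro hB hm'⟩

-- F is subadditive along 0-edges
lemma Fv_sub0 {n x y : Nat} {d : Nat → Nat} {p e k st : Nat}
    (hst : st = x ∨ st = y) (hx : x < 10) (hy : y < 10) (hd : ∀ i < n, d i < 10)
    (hp : p < n) (hp1 : p + 1 < n) (hmatch : d (p + 1) = (e + st) % 10)
    (h : Fv x y d p e = some k) :
    ∃ k' ≤ k, Fv x y d (p + 1) (d (p + 1)) = some k' := by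
  obtain ⟨c, t, hB, hm, rfl⟩ := Fv_some_elim h
  have hst10 : st < 10 := by rcases hst with rfl | rfl <;> assumption
  have he10 : e < 10 := mdist_lt10 (hd p hp) hm
  have hpre : pre10 (d (p + 1)) st = e := pre10_inv he10 hst10 hmatch.symm
  have harm : mdist x y (d p) (pre10 (d (p + 1)) st) = some t := by rw [hpre]; exact hm
  obtain ⟨t', ht', htc⟩ : ∃ t' ≤ t, tcost x y d p = some t' := by
    rcases hst with rfl | rfl
    · exact ominN_ne_none harm
    · exact ominN_ne_none' harm
  refine ⟨c + t', by omega, ?_⟩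
  rw [Fv_entry (hd (p + 1) hp1)]
  unfold Bcost
  rw [hB, htc]
  rfl


-- ===== A-side BFS machinery =====
structure Ctx (n x y : Nat) (d : Nat → Nat) : Prop where
  hx : x < 10
  hy : y < 10
  hd : ∀ i < n, d i < 10
  hd0 : d 0 = 0
  hn : 0 < n

def BClosed (n x y : Nat) (d : Nat → Nat) (dist : Nat → Nat → Int) (u : Nat × Nat) : Prop :=
  ∀ st, (st = x ∨ st = y) →
    dist u.1 ((u.2 + st) % 10) ≠ -1 ∧
    (u.1 + 1 < n → d (u.1 + 1) = (u.2 + st) % 10 → dist (u.1 + 1) (d (u.1 + 1)) ≠ -1)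

def BInv (n x y : Nat) (d : Nat → Nat) (dist : Nat → Nat → Int) (q : List (Nat × Nat)) : Prop :=
  (∀ p e, dist p e ≠ -1 → ∃ k : Nat, dist p e = (k : Int) ∧ Fv x y d p e = some k ∧ p < n ∧ e < 10) ∧
  (∀ u ∈ q, dist u.1 u.2 ≠ -1) ∧
  q.Pairwise (fun u v => dist u.1 u.2 ≤ dist v.1 v.2) ∧
  (∀ u : Nat × Nat, dist u.1 u.2 ≠ -1 → u ∉ q → BClosed n x y d dist u) ∧
  dist 0 0 ≠ -1 ∧
  (∀ p e, dist p e ≠ -1 → dist p (d p) ≠ -1) ∧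
  (∀ u ∈ q, ∀ v ∈ q, dist v.1 v.2 ≤ dist u.1 u.2 + 1)

lemma bwalk {n x y : Nat} {d : Nat → Nat} {dist : Nat → Nat → Int} {q : List (Nat × Nat)}
    (ctx : Ctx n x y d) (hInv : BInv n x y d dist q) :
    ∀ (u z : Nat × Nat) (k : Nat), Reach n x y d u k z → ∀ (cu : Nat),
      dist u.1 u.2 = (cu : Int) → dist z.1 z.2 = -1 →
      ∃ u' ∈ q, ∃ c' : Nat, dist u'.1 u'.2 = (c' : Int) ∧ c' ≤ cu + k := by
  obtain ⟨hI, hQ, hS, hC, hsrc, hent, hspan⟩ := hInv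
  intro u z k hR
  induction hR with
  | refl w =>
      intro cu hcu hz
      rw [hz] at hcu
      exact absurd hcu.symm (by simp)
  | @step u v z w k e _ ih =>
      intro cu hcu hz
      by_cases huq : u ∈ q
      · exact ⟨u, huq, cu, hcu, by omega⟩
      · have huset : dist u.1 u.2 ≠ -1 := by rw [hcu]; simp
        obtain ⟨ku, hku, hFu, hun, hue⟩ := hI u.1 u.2 huset
        have hkucu : ku = cu := by rw [hcu] at hku; exact_mod_cast hku.symm
        subst hkucu
        have hcl := hC u huset huq
        obtain ⟨st, hst, hcase⟩ := e
        rcases hcase with ⟨hw, hv⟩ | ⟨hw, hlt, hmatch, hv⟩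
        · -- 1-edge
          have hvset : dist v.1 v.2 ≠ -1 := by rw [hv]; exact (hcl st hst).1
          obtain ⟨kv, hkv, hFv, _, _⟩ := hI v.1 v.2 hvset
          obtain ⟨k', hk', hFv'⟩ := Fv_sub1 (d := d) hst hFu
          have : kv = k' := by
            rw [hv] at hFv
            simp only at hFv
            rw [hFv] at hFv'
            exact Option.some_inj.mp hFv'
          obtain ⟨u', hu', c', hc', hb⟩ := ih kv hkv hz
          exact ⟨u', hu', c', hc', by omega⟩
        · -- 0-edge
          have hvset : dist v.1 v.2 ≠ -1 := by rw [hv]; exact (hcl st hst).2 hlt hmatch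
          obtain ⟨kv, hkv, hFv, _, _⟩ := hI v.1 v.2 hvset
          obtain ⟨k', hk', hFv'⟩ := Fv_sub0 hst ctx.hx ctx.hy ctx.hd hun hlt hmatch hFu
          have : kv = k' := by
            rw [hv] at hFv
            simp only at hFv
            rw [hFv] at hFv'
            exact Option.some_inj.mp hFv'
          obtain ⟨u', hu', c', hc', hb⟩ := ih kv hkv hz
          exact ⟨u', hu', c', hc', by omega⟩

lemma qfrontier {n x y : Nat} {d : Nat → Nat} {dist : Nat → Nat → Int} {q : List (Nat × Nat)}
    (ctx : Ctx n x y d) (hInv : BInv n x y d dist q) {p e k : Nat}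
    (hp : p < n) (hF : Fv x y d p e = some k) (hunset : dist p e = -1) :
    ∃ u' ∈ q, ∃ c' : Nat, dist u'.1 u'.2 = (c' : Int) ∧ c' ≤ k := by
  have hR : Reach n x y d (0, 0) k (p, e) := by
    have := Fv_realize ctx.hx ctx.hy ctx.hd hp hF
    rwa [ctx.hd0] at this
  obtain ⟨k0, hk0, hF0, _, _⟩ := hInv.1 0 0 hInv.2.2.2.2.1
  have hF00 : Fv x y d 0 0 = some 0 := by
    have : Fv x y d 0 (d 0) = Bcost x y d 0 := Fv_entry (by rw [ctx.hd0]; omega)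
    rw [ctx.hd0] at this
    rw [this]; rfl
  have : k0 = 0 := by rw [hF0] at hF00; exact Option.some_inj.mp hF00
  subst this
  obtain ⟨u', hu', c', hc', hb⟩ := bwalk ctx hInv (0, 0) (p, e) k hR 0 hk0 hunset
  exact ⟨u', hu', c', hc', by omega⟩

-- every state with Fv-value < the head's value has been set and fully processed
lemma bstar {n x y : Nat} {d : Nat → Nat} {dist : Nat → Nat → Int} {u : Nat × Nat}
    {rest : List (Nat × Nat)} (ctx : Ctx n x y d) (hInv : BInv n x y d dist (u :: rest))
    {du : Nat} (hdu : dist u.1 u.2 = (du : Int)) {p e k : Nat}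
    (hp : p < n) (hF : Fv x y d p e = some k) (hk : k < du) :
    dist p e ≠ -1 ∧ (p, e) ∉ (u :: rest) := by
  obtain ⟨hI, hQ, hS, hC, hsrc, hent, hspan⟩ := hInv
  have hmin : ∀ v ∈ rest, dist u.1 u.2 ≤ dist v.1 v.2 := by
    intro v hv
    exact (List.pairwise_cons.mp hS).1 v hv
  constructor
  · intro hunset
    obtain ⟨u', hu', c', hc', hb⟩ :=
      qfrontier ctx ⟨hI, hQ, hS, hC, hsrc, hent, hspan⟩ hp hF hunset
    rcases List.mem_cons.mp hu' with rfl | hmem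
    · rw [hdu] at hc'
      have : du = c' := by exact_mod_cast hc'
      omega
    · have := hmin u' hmem
      rw [hdu, hc'] at this
      have : du ≤ c' := by exact_mod_cast this
      omega
  · intro hmem
    have hset : dist p e ≠ -1 := hQ (p, e) hmem
    obtain ⟨k', hk', hF', _, _⟩ := hI p e hset
    have hkk : k' = k := by rw [hF'] at hF; exact Option.some_inj.mp hF
    subst hkk
    rcases List.mem_cons.mp hmem with heq | hmem'
    · rw [← heq] at hdu
      simp only at hdu
      rw [hk'] at hdu
      have : k' = du := by exact_mod_cast hdu
      omega
    · have := hmin _ hmem'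
      rw [hdu, hk'] at this
      have : du ≤ k' := by exact_mod_cast this
      omega

def unsetCnt (n : Nat) (dist : Nat → Nat → Int) : Nat :=
  (((Finset.range n) ×ˢ (Finset.range 10)).filter (fun pe => dist pe.1 pe.2 = -1)).card

lemma unsetCnt_upd {n : Nat} {dist : Nat → Nat → Int} {p e : Nat} {v : Int} (hp : p < n) (he : e < 10)
    (hunset : dist p e = -1) (hv : v ≠ -1) :
    unsetCnt n (upd2 dist p e v) + 1 = unsetCnt n dist := by
  unfold unsetCnt
  have hmem : (p, e) ∈ ((Finset.range n) ×ˢ (Finset.range 10)).filter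
      (fun pe => dist pe.1 pe.2 = -1) := by
    simp [Finset.mem_filter, Finset.mem_product, hp, he, hunset]
  have hset : ((Finset.range n) ×ˢ (Finset.range 10)).filter
        (fun pe => upd2 dist p e v pe.1 pe.2 = -1) =
      (((Finset.range n) ×ˢ (Finset.range 10)).filter
        (fun pe => dist pe.1 pe.2 = -1)).erase (p, e) := by
    ext q
    simp only [Finset.mem_filter, Finset.mem_erase, Finset.mem_product, Finset.mem_range, upd2]
    constructor
    · rintro ⟨⟨h1, h2⟩, h3⟩
      split_ifs at h3 with hc
      · exact absurd h3 hv
      · refine ⟨?_, ⟨h1, h2⟩, h3⟩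
        intro heq
        exact hc ⟨congrArg Prod.fst heq, congrArg Prod.snd heq⟩
    · rintro ⟨hne, ⟨h1, h2⟩, h3⟩
      refine ⟨⟨h1, h2⟩, ?_⟩
      split_ifs with hc
      · exact absurd (Prod.ext hc.1 hc.2) hne
      · exact h3
  rw [hset, Finset.card_erase_of_mem hmem]
  have := Finset.card_pos.mpr ⟨_, hmem⟩
  omega

-- a fresh 1-edge discovery gets exactly value du + 1
lemma assign1 {n x y : Nat} {d : Nat → Nat} {dist0 : Nat → Nat → Int} {u : Nat × Nat}
    {rest : List (Nat × Nat)} (ctx : Ctx n x y d) (hInv : BInv n x y d dist0 (u :: rest))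
    {du : Nat} (hdu : dist0 u.1 u.2 = (du : Int)) {st : Nat} (hst : st = x ∨ st = y)
    (hunset : dist0 u.1 ((u.2 + st) % 10) = -1) :
    Fv x y d u.1 ((u.2 + st) % 10) = some (du + 1) := by
  have huset : dist0 u.1 u.2 ≠ -1 := by rw [hdu]; simp
  obtain ⟨ku, hku, hFu, hun, hue⟩ := hInv.1 u.1 u.2 huset
  have hkudu : ku = du := by rw [hdu] at hku; exact_mod_cast hku.symm
  rw [hkudu] at hFu
  obtain ⟨c, t, hB, hm, hdu'⟩ := Fv_some_elim hFu
  obtain ⟨j', hj', hm'⟩ := mdist_triangle hst hm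
  have hF' : Fv x y d u.1 ((u.2 + st) % 10) = some (c + j') := Fv_intro hB hm'
  have hnotlt : ¬ (c + j' < du) := by
    intro hlt
    exact (bstar ctx hInv hdu hun hF' hlt).1 hunset
  have hne : c + j' ≠ du := by
    intro heq
    rcases j' with _ | j''
    · -- j' = 0: the target is the entry digit, already set
      have : (u.2 + st) % 10 = d u.1 := mdist_eq_zero (ctx.hd u.1 hun) hm'
      rw [this] at hunset
      exact (hInv.2.2.2.2.2.1 u.1 u.2 huset) hunset
    · obtain ⟨st', hst', b', hb', hmb'⟩ := mdist_pred hm'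
      have hFb' : Fv x y d u.1 b' = some (c + j'') := Fv_intro hB hmb'
      have hproc := bstar ctx hInv hdu hun hFb' (by omega)
      have hcl := hInv.2.2.2.1 (u.1, b') hproc.1 hproc.2
      have := (hcl st' hst').1
      simp only at this
      rw [← hb'] at this
      exact this hunset
  rw [hF']
  exact congrArg some (by omega)

-- a fresh 0-edge discovery gets exactly value du
lemma assign0 {n x y : Nat} {d : Nat → Nat} {dist0 : Nat → Nat → Int} {u : Nat × Nat}
    {rest : List (Nat × Nat)} (ctx : Ctx n x y d) (hInv : BInv n x y d dist0 (u :: rest))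
    {du : Nat} (hdu : dist0 u.1 u.2 = (du : Int)) {st : Nat} (hst : st = x ∨ st = y)
    (hlt : u.1 + 1 < n) (hmatch : d (u.1 + 1) = (u.2 + st) % 10)
    (hunset : dist0 (u.1 + 1) (d (u.1 + 1)) = -1) :
    Fv x y d (u.1 + 1) (d (u.1 + 1)) = some du := by
  have huset : dist0 u.1 u.2 ≠ -1 := by rw [hdu]; simp
  obtain ⟨ku, hku, hFu, hun, hue⟩ := hInv.1 u.1 u.2 huset
  have hkudu : ku = du := by rw [hdu] at hku; exact_mod_cast hku.symm
  rw [hkudu] at hFu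
  obtain ⟨k', hk', hF'⟩ := Fv_sub0 hst ctx.hx ctx.hy ctx.hd hun hlt hmatch hFu
  have hnotlt : ¬ (k' < du) := by
    intro h
    exact (bstar ctx hInv hdu hlt hF' h).1 hunset
  rw [hF']
  exact congrArg some (by omega)

structure Mid (n x y : Nat) (d : Nat → Nat) (dist0 : Nat → Nat → Int)
    (rest : List (Nat × Nat)) (du : Nat)
    (dist : Nat → Nat → Int) (q : List (Nat × Nat)) : Prop where
  ext : ∀ p e, dist0 p e ≠ -1 → dist p e = dist0 p e
  hI : ∀ p e, dist p e ≠ -1 → ∃ k : Nat, dist p e = (k : Int) ∧ Fv x y d p e = some k ∧ p < n ∧ e < 10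
  hQ : ∀ v ∈ q, dist v.1 v.2 ≠ -1
  hS : q.Pairwise (fun a b => dist a.1 a.2 ≤ dist b.1 b.2)
  hLo : ∀ v ∈ q, (du : Int) ≤ dist v.1 v.2
  hHi : ∀ v ∈ q, dist v.1 v.2 ≤ (du : Int) + 1
  hNew : ∀ v : Nat × Nat, dist v.1 v.2 ≠ -1 → dist0 v.1 v.2 = -1 → v ∈ q
  hEnt : ∀ p e, dist p e ≠ -1 → dist p (d p) ≠ -1
  hCnt : q.length + unsetCnt n dist = rest.length + unsetCnt n dist0
  hRest : ∀ v ∈ rest, v ∈ q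

-- adding a newly discovered state to the front (value du) or back (value du + 1)
lemma mid_add {n x y : Nat} {d : Nat → Nat} {dist0 : Nat → Nat → Int}
    {rest : List (Nat × Nat)} {du : Nat} {dist : Nat → Nat → Int} {q : List (Nat × Nat)}
    (hm : Mid n x y d dist0 rest du dist q) (v0 : Nat × Nat) (w : Nat)
    (hw : w = du ∨ w = du + 1)
    (hguard : dist v0.1 v0.2 = -1) (hF : Fv x y d v0.1 v0.2 = some w)
    (hv0n : v0.1 < n) (hv0e : v0.2 < 10)
    (hentArg : v0.2 = d v0.1 ∨ dist v0.1 (d v0.1) ≠ -1)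
    (newq : List (Nat × Nat))
    (hnq : (w = du ∧ newq = v0 :: q) ∨ (w = du + 1 ∧ newq = q ++ [v0])) :
    Mid n x y d dist0 rest du (upd2 dist v0.1 v0.2 (w : Int)) newq := by
  have hwne : ((w : Int)) ≠ -1 := by simp
  have hvq : v0 ∉ q := fun h => (hm.hQ v0 h) hguard
  have hsame : ∀ p e, ¬ (p = v0.1 ∧ e = v0.2) → upd2 dist v0.1 v0.2 (w : Int) p e = dist p e := by
    intro p e h
    unfold upd2
    rw [if_neg h]
  have hat : upd2 dist v0.1 v0.2 (w : Int) v0.1 v0.2 = (w : Int) := by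
    unfold upd2
    rw [if_pos ⟨rfl, rfl⟩]
  have hkeep : ∀ p e, dist p e ≠ -1 → upd2 dist v0.1 v0.2 (w : Int) p e = dist p e := by
    intro p e h
    refine hsame p e ?_
    rintro ⟨rfl, rfl⟩
    exact h hguard
  have hkeep' : ∀ v : Nat × Nat, v ∈ q → upd2 dist v0.1 v0.2 (w : Int) v.1 v.2 = dist v.1 v.2 :=
    fun v hv => hkeep v.1 v.2 (hm.hQ v hv)
  have hset : ∀ p e, upd2 dist v0.1 v0.2 (w : Int) p e ≠ -1 →
      (p = v0.1 ∧ e = v0.2) ∨ dist p e ≠ -1 := by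
    intro p e h
    by_cases hc : p = v0.1 ∧ e = v0.2
    · exact Or.inl hc
    · rw [hsame p e hc] at h
      exact Or.inr h
  have hd0v0 : dist0 v0.1 v0.2 = -1 := by
    by_contra h0
    rw [hm.ext v0.1 v0.2 h0] at hguard
    exact h0 hguard
  refine ⟨?_, ?_, ?_, ?_, ?_, ?_, ?_, ?_, ?_, ?_⟩
  · -- ext
    intro p e h0
    have hne : ¬ (p = v0.1 ∧ e = v0.2) := by
      rintro ⟨rfl, rfl⟩
      exact h0 hd0v0
    rw [hsame p e hne]
    exact hm.ext p e h0
  · -- hI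
    intro p e h
    rcases hset p e h with ⟨rfl, rfl⟩ | hold
    · exact ⟨w, hat, hF, hv0n, hv0e⟩
    · obtain ⟨k, hk, hFk, h1, h2⟩ := hm.hI p e hold
      exact ⟨k, by rw [hkeep p e hold]; exact hk, hFk, h1, h2⟩
  · -- hQ
    intro v hv
    rcases hnq with ⟨_, rfl⟩ | ⟨_, rfl⟩
    · rcases List.mem_cons.mp hv with rfl | hv'
      · rw [hat]; exact hwne
      · rw [hkeep' v hv']; exact hm.hQ v hv'
    · rcases List.mem_append.mp hv with hv' | hv'
      · rw [hkeep' v hv']; exact hm.hQ v hv'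
      · rcases List.mem_singleton.mp hv' with rfl
        rw [hat]; exact hwne
  · -- hS
    have htail : q.Pairwise (fun a b => upd2 dist v0.1 v0.2 (w : Int) a.1 a.2 ≤
        upd2 dist v0.1 v0.2 (w : Int) b.1 b.2) := by
      refine List.Pairwise.imp_of_mem ?_ hm.hS
      intro a b ha hb hab
      rw [hkeep' a ha, hkeep' b hb]
      exact hab
    rcases hnq with ⟨hwd, rfl⟩ | ⟨hwd, rfl⟩
    · refine List.pairwise_cons.mpr ⟨?_, htail⟩
      intro b hb
      rw [hat, hkeep' b hb, hwd]
      exact hm.hLo b hb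
    · refine List.pairwise_append.mpr ⟨htail, List.pairwise_singleton _ _, ?_⟩
      intro a ha b hb
      rcases List.mem_singleton.mp hb with rfl
      rw [hat, hkeep' a ha, hwd]
      push_cast
      have := hm.hHi a ha
      omega
  · -- hLo
    intro v hv
    have hvin : v = v0 ∨ v ∈ q := by
      rcases hnq with ⟨_, rfl⟩ | ⟨_, rfl⟩
      · rcases List.mem_cons.mp hv with h | h
        · exact Or.inl h
        · exact Or.inr h
      · rcases List.mem_append.mp hv with h | h
        · exact Or.inr h
        · exact Or.inl (List.mem_singleton.mp h)
    rcases hvin with rfl | hv'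
    · rw [hat]
      rcases hw with rfl | rfl
      · omega
      · push_cast; omega
    · rw [hkeep' v hv']
      exact hm.hLo v hv'
  · -- hHi
    intro v hv
    have hvin : v = v0 ∨ v ∈ q := by
      rcases hnq with ⟨_, rfl⟩ | ⟨_, rfl⟩
      · rcases List.mem_cons.mp hv with h | h
        · exact Or.inl h
        · exact Or.inr h
      · rcases List.mem_append.mp hv with h | h
        · exact Or.inr h
        · exact Or.inl (List.mem_singleton.mp h)
    rcases hvin with rfl | hv'
    · rw [hat]
      rcases hw with rfl | rfl
      · omega
      · push_cast; omega
    · rw [hkeep' v hv']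
      exact hm.hHi v hv'
  · -- hNew
    intro v hv h0
    rcases hset v.1 v.2 hv with hc | hold
    · have : v = v0 := Prod.ext hc.1 hc.2
      subst this
      rcases hnq with ⟨_, rfl⟩ | ⟨_, rfl⟩
      · exact List.mem_cons_self ..
      · exact List.mem_append.mpr (Or.inr (List.mem_singleton.mpr rfl))
    · have := hm.hNew v hold h0
      rcases hnq with ⟨_, rfl⟩ | ⟨_, rfl⟩
      · exact List.mem_cons_of_mem _ this
      · exact List.mem_append.mpr (Or.inl this)
  · -- hEnt
    intro p e h
    rcases hset p e h with ⟨rfl, rfl⟩ | hold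
    · rcases hentArg with he | he
      · rw [← he, hat]
        exact hwne
      · rw [hkeep _ _ he]
        exact he
    · have h2 := hm.hEnt p e hold
      rw [hkeep _ _ h2]
      exact h2
  · -- hCnt
    have := unsetCnt_upd (dist := dist) hv0n hv0e hguard hwne
    have hlen : newq.length = q.length + 1 := by
      rcases hnq with ⟨_, rfl⟩ | ⟨_, rfl⟩ <;> simp
    have hc := hm.hCnt
    rw [hlen]
    omega
  · -- hRest
    intro v hv
    have := hm.hRest v hv
    rcases hnq with ⟨_, rfl⟩ | ⟨_, rfl⟩
    · exact List.mem_cons_of_mem _ this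
    · exact List.mem_append.mpr (Or.inl this)

lemma relax0_mid {s : String} {n x y : Nat} {d : Nat → Nat} {dist0 : Nat → Nat → Int}
    {u : Nat × Nat} {rest : List (Nat × Nat)} {du : Nat} {dist : Nat → Nat → Int}
    {q : List (Nat × Nat)} {st : Nat}
    (ctx : Ctx n x y d) (Hd : ∀ i, i < n → digAt s i = ((d i : Nat) : Int))
    (hInv : BInv n x y d dist0 (u :: rest)) (hdu : dist0 u.1 u.2 = (du : Int))
    (hm : Mid n x y d dist0 rest du dist q) (hst : st = x ∨ st = y) :
    Mid n x y d dist0 rest du (relax0 s n u.1 u.2 st (dist, q)).1 (relax0 s n u.1 u.2 st (dist, q)).2 ∧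
    (u.1 + 1 < n → d (u.1 + 1) = (u.2 + st) % 10 →
      (relax0 s n u.1 u.2 st (dist, q)).1 (u.1 + 1) ((u.2 + st) % 10) ≠ -1) ∧
    (∀ p e, dist p e ≠ -1 → (relax0 s n u.1 u.2 st (dist, q)).1 p e ≠ -1) := by
  have huset0 : dist0 u.1 u.2 ≠ -1 := by rw [hdu]; simp
  have hdist_u : dist u.1 u.2 = (du : Int) := by rw [hm.ext u.1 u.2 huset0]; exact hdu
  by_cases hcond : u.1 + 1 < n ∧ digAt s (u.1 + 1) = (((u.2 + st) % 10 : Nat) : Int)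
  · obtain ⟨h1, h2⟩ := hcond
    have hd1 : d (u.1 + 1) = (u.2 + st) % 10 := by
      rw [Hd _ h1] at h2
      exact_mod_cast h2
    by_cases hguard : dist (u.1 + 1) ((u.2 + st) % 10) = -1
    · have hres : relax0 s n u.1 u.2 st (dist, q) =
          (upd2 dist (u.1 + 1) ((u.2 + st) % 10) (dist u.1 u.2),
            (u.1 + 1, (u.2 + st) % 10) :: q) := by
        unfold relax0
        rw [if_pos ⟨h1, h2⟩, if_pos hguard]
      rw [hres]
      have h0 : dist0 (u.1 + 1) ((u.2 + st) % 10) = -1 := by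
        by_contra hc
        rw [hm.ext _ _ hc] at hguard
        exact hc hguard
      have hF : Fv x y d (u.1 + 1) ((u.2 + st) % 10) = some du := by
        have := assign0 ctx hInv hdu hst h1 hd1 (by rw [hd1]; exact h0)
        rwa [hd1] at this
      have hMid := mid_add hm ((u.1 + 1, (u.2 + st) % 10)) du (Or.inl rfl) hguard hF h1
        (by omega) (Or.inl hd1.symm) _ (Or.inl ⟨rfl, rfl⟩)
      rw [hdist_u]
      refine ⟨hMid, ?_, ?_⟩
      · intro _ _
        show upd2 dist (u.1 + 1) ((u.2 + st) % 10) (du : Int) (u.1 + 1) ((u.2 + st) % 10) ≠ -1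
        unfold upd2
        rw [if_pos ⟨rfl, rfl⟩]
        simp
      · intro p e hp
        show upd2 dist (u.1 + 1) ((u.2 + st) % 10) (du : Int) p e ≠ -1
        unfold upd2
        split_ifs with hc
        · simp
        · exact hp
    · have hres : relax0 s n u.1 u.2 st (dist, q) = (dist, q) := by
        unfold relax0
        rw [if_pos ⟨h1, h2⟩, if_neg hguard]
      rw [hres]
      exact ⟨hm, fun _ _ => hguard, fun p e hp => hp⟩
  · have hres : relax0 s n u.1 u.2 st (dist, q) = (dist, q) := by
      unfold relax0
      rw [if_neg hcond]
    rw [hres]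
    refine ⟨hm, ?_, fun p e hp => hp⟩
    intro h1 h2
    exact absurd ⟨h1, by rw [Hd _ h1, h2]⟩ hcond

lemma relax1_mid {n x y : Nat} {d : Nat → Nat} {dist0 : Nat → Nat → Int}
    {u : Nat × Nat} {rest : List (Nat × Nat)} {du : Nat} {dist : Nat → Nat → Int}
    {q : List (Nat × Nat)} {st : Nat}
    (ctx : Ctx n x y d)
    (hInv : BInv n x y d dist0 (u :: rest)) (hdu : dist0 u.1 u.2 = (du : Int))
    (hm : Mid n x y d dist0 rest du dist q) (hst : st = x ∨ st = y) :
    Mid n x y d dist0 rest du (relax1 u.1 u.2 st (dist, q)).1 (relax1 u.1 u.2 st (dist, q)).2 ∧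
    (relax1 u.1 u.2 st (dist, q)).1 u.1 ((u.2 + st) % 10) ≠ -1 ∧
    (∀ p e, dist p e ≠ -1 → (relax1 u.1 u.2 st (dist, q)).1 p e ≠ -1) := by
  have huset0 : dist0 u.1 u.2 ≠ -1 := by rw [hdu]; simp
  obtain ⟨_, _, _, hun, _⟩ := hInv.1 u.1 u.2 huset0
  have hdist_u : dist u.1 u.2 = (du : Int) := by rw [hm.ext u.1 u.2 huset0]; exact hdu
  by_cases hguard : dist u.1 ((u.2 + st) % 10) = -1
  · have hres : relax1 u.1 u.2 st (dist, q) =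
        (upd2 dist u.1 ((u.2 + st) % 10) ((du + 1 : Nat) : Int), q ++ [(u.1, (u.2 + st) % 10)]) := by
      unfold relax1
      rw [if_pos hguard]
      show (upd2 dist u.1 ((u.2 + st) % 10) (dist u.1 u.2 + 1),
        q ++ [(u.1, (u.2 + st) % 10)]) = _
      rw [hdist_u]
      have : (du : Int) + 1 = ((du + 1 : Nat) : Int) := by push_cast; ring
      rw [this]
    rw [hres]
    have h0 : dist0 u.1 ((u.2 + st) % 10) = -1 := by
      by_contra hc
      rw [hm.ext _ _ hc] at hguard
      exact hc hguard
    have hF : Fv x y d u.1 ((u.2 + st) % 10) = some (du + 1) := assign1 ctx hInv hdu hst h0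
    have hentArg : dist u.1 (d u.1) ≠ -1 := hm.hEnt u.1 u.2 (by rw [hdist_u]; simp)
    have hMid := mid_add hm ((u.1, (u.2 + st) % 10)) (du + 1) (Or.inr rfl) hguard hF hun
      (by omega) (Or.inr hentArg) _ (Or.inr ⟨rfl, rfl⟩)
    refine ⟨hMid, ?_, ?_⟩
    · show upd2 dist u.1 ((u.2 + st) % 10) ((du + 1 : Nat) : Int) u.1 ((u.2 + st) % 10) ≠ -1
      unfold upd2
      rw [if_pos ⟨rfl, rfl⟩]
      omega
    · intro p e hp
      show upd2 dist u.1 ((u.2 + st) % 10) ((du + 1 : Nat) : Int) p e ≠ -1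
      unfold upd2
      split_ifs with hc
      · omega
      · exact hp
  · have hres : relax1 u.1 u.2 st (dist, q) = (dist, q) := by
      unfold relax1
      rw [if_neg hguard]
    rw [hres]
    exact ⟨hm, hguard, fun p e hp => hp⟩

lemma doStep_mid {s : String} {n x y : Nat} {d : Nat → Nat} {dist0 : Nat → Nat → Int}
    {u : Nat × Nat} {rest : List (Nat × Nat)} {du : Nat} {dist : Nat → Nat → Int}
    {q : List (Nat × Nat)} {st : Nat}
    (ctx : Ctx n x y d) (Hd : ∀ i, i < n → digAt s i = ((d i : Nat) : Int))
    (hInv : BInv n x y d dist0 (u :: rest)) (hdu : dist0 u.1 u.2 = (du : Int))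
    (hm : Mid n x y d dist0 rest du dist q) (hst : st = x ∨ st = y) :
    Mid n x y d dist0 rest du (doStep s n u.1 u.2 st (dist, q)).1 (doStep s n u.1 u.2 st (dist, q)).2 ∧
    ((u.1 + 1 < n → d (u.1 + 1) = (u.2 + st) % 10 →
        (doStep s n u.1 u.2 st (dist, q)).1 (u.1 + 1) ((u.2 + st) % 10) ≠ -1) ∧
      (doStep s n u.1 u.2 st (dist, q)).1 u.1 ((u.2 + st) % 10) ≠ -1) ∧
    (∀ p e, dist p e ≠ -1 → (doStep s n u.1 u.2 st (dist, q)).1 p e ≠ -1) := by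
  obtain ⟨hm0, hpost0, hkeep0⟩ := relax0_mid ctx Hd hInv hdu hm hst
  obtain ⟨hm1, hpost1, hkeep1⟩ :=
    relax1_mid (dist := (relax0 s n u.1 u.2 st (dist, q)).1)
      (q := (relax0 s n u.1 u.2 st (dist, q)).2) ctx hInv hdu hm0 hst
  unfold doStep
  refine ⟨hm1, ⟨?_, ?_⟩, ?_⟩
  · intro h1 h2
    exact hkeep1 _ _ (hpost0 h1 h2)
  · exact hpost1
  · intro p e hp
    exact hkeep1 p e (hkeep0 p e hp)

lemma pop_step {s : String} {n x y : Nat} {d : Nat → Nat} {dist0 : Nat → Nat → Int}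
    {u : Nat × Nat} {rest : List (Nat × Nat)}
    (ctx : Ctx n x y d) (Hd : ∀ i, i < n → digAt s i = ((d i : Nat) : Int))
    (hInv : BInv n x y d dist0 (u :: rest)) :
    BInv n x y d (doStep s n u.1 u.2 y (doStep s n u.1 u.2 x (dist0, rest))).1
      (doStep s n u.1 u.2 y (doStep s n u.1 u.2 x (dist0, rest))).2 ∧
    (doStep s n u.1 u.2 y (doStep s n u.1 u.2 x (dist0, rest))).2.length +
        unsetCnt n (doStep s n u.1 u.2 y (doStep s n u.1 u.2 x (dist0, rest))).1 + 1 =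
      (u :: rest).length + unsetCnt n dist0 := by
  obtain ⟨hI, hQ, hS, hC, hsrc, hent, hspan⟩ := hInv
  have hInv' : BInv n x y d dist0 (u :: rest) := ⟨hI, hQ, hS, hC, hsrc, hent, hspan⟩
  have huset0 : dist0 u.1 u.2 ≠ -1 := hQ u (List.mem_cons_self ..)
  obtain ⟨du, hdu, hFu, hun, hue⟩ := hI u.1 u.2 huset0
  have hmin : ∀ v ∈ rest, dist0 u.1 u.2 ≤ dist0 v.1 v.2 := (List.pairwise_cons.mp hS).1
  have hm0 : Mid n x y d dist0 rest du dist0 rest := by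
    refine ⟨fun p e _ => rfl, hI, ?_, (List.pairwise_cons.mp hS).2, ?_, ?_, ?_, hent, rfl, fun v hv => hv⟩
    · exact fun v hv => hQ v (List.mem_cons_of_mem _ hv)
    · intro v hv
      have := hmin v hv
      rwa [hdu] at this
    · intro v hv
      have := hspan u (List.mem_cons_self ..) v (List.mem_cons_of_mem _ hv)
      rwa [hdu] at this
    · intro v hv h0
      exact absurd h0 hv
  obtain ⟨hm1, ⟨hpx0, hpx1⟩, hkx⟩ := doStep_mid ctx Hd hInv' hdu hm0 (Or.inl rfl)
  obtain ⟨hm2, ⟨hpy0, hpy1⟩, hky⟩ := doStep_mid ctx Hd hInv' hdu hm1 (Or.inr rfl)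
  set D1 := doStep s n u.1 u.2 x (dist0, rest) with hD1
  set D2 := doStep s n u.1 u.2 y (D1.1, D1.2) with hD2
  constructor
  · refine ⟨hm2.hI, hm2.hQ, hm2.hS, ?_, ?_, hm2.hEnt, ?_⟩
    · -- closure
      intro v hvset hvq
      by_cases hvu : v = u
      · subst hvu
        intro st hst
        rcases hst with rfl | rfl
        · exact ⟨hky _ _ hpx1, fun h1 h2 => by rw [h2]; exact hky _ _ (hpx0 h1 h2)⟩
        · exact ⟨hpy1, fun h1 h2 => by rw [h2]; exact hpy0 h1 h2⟩
      · by_cases h0 : dist0 v.1 v.2 = -1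
        · exact absurd (hm2.hNew v hvset h0) hvq
        · have hvrest : v ∉ rest := fun hr => hvq (hm2.hRest v hr)
          have hvcons : v ∉ (u :: rest) := by
            intro hc
            rcases List.mem_cons.mp hc with rfl | hr
            · exact hvu rfl
            · exact hvrest hr
          have hcl := hC v h0 hvcons
          intro st hst
          obtain ⟨c1, c2⟩ := hcl st hst
          exact ⟨by rw [hm2.ext _ _ c1]; exact c1,
            fun h1 h2 => by rw [hm2.ext _ _ (c2 h1 h2)]; exact c2 h1 h2⟩
    · rw [hm2.ext 0 0 hsrc]
      exact hsrc
    · -- span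
      intro a ha b hb
      have h1 := hm2.hLo a ha
      have h2 := hm2.hHi b hb
      omega
  · have := hm2.hCnt
    simp only [List.length_cons]
    omega

def BPost (n x y : Nat) (d : Nat → Nat) (dist : Nat → Nat → Int) : Prop :=
  (∀ p e, dist p e ≠ -1 → ∃ k : Nat, dist p e = (k : Int) ∧ Fv x y d p e = some k ∧ p < n ∧ e < 10) ∧
  (∀ u : Nat × Nat, dist u.1 u.2 ≠ -1 → BClosed n x y d dist u) ∧
  dist 0 0 ≠ -1

lemma bfs_post {s : String} {n x y : Nat} {d : Nat → Nat}
    (ctx : Ctx n x y d) (Hd : ∀ i, i < n → digAt s i = ((d i : Nat) : Int)) :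
    ∀ (f : Nat) (dist : Nat → Nat → Int) (q : List (Nat × Nat)),
      BInv n x y d dist q → q.length + unsetCnt n dist ≤ f →
      BPost n x y d (bfs s n x y f dist q) := by
  intro f
  induction f with
  | zero =>
      intro dist q hInv hf
      have hq : q = [] := by
        cases q with
        | nil => rfl
        | cons a l => simp at hf
      subst hq
      exact ⟨hInv.1, fun u hu => hInv.2.2.2.1 u hu (by simp), hInv.2.2.2.2.1⟩
  | succ f ih =>
      intro dist q hInv hf
      cases q with
      | nil =>
          exact ⟨hInv.1, fun u hu => hInv.2.2.2.1 u hu (by simp), hInv.2.2.2.2.1⟩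
      | cons u rest =>
          obtain ⟨pos, dg⟩ := u
          obtain ⟨hInv', hcnt⟩ := pop_step ctx Hd hInv
          have hred : bfs s n x y (f + 1) dist ((pos, dg) :: rest) =
              bfs s n x y f (doStep s n pos dg y (doStep s n pos dg x (dist, rest))).1
                (doStep s n pos dg y (doStep s n pos dg x (dist, rest))).2 := rfl
          rw [hred]
          apply ih _ _ hInv'
          simp only [List.length_cons] at hf hcnt ⊢
          omega

lemma charEq {c c' : Char} (h : c.val.toNat = c'.val.toNat) : c = c' :=
  Char.ext (UInt32.toNat_inj.mp h)

lemma digit_cases {c : Char} (h : c.isDigit = true) :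
    c = '0' ∨ c = '1' ∨ c = '2' ∨ c = '3' ∨ c = '4' ∨
    c = '5' ∨ c = '6' ∨ c = '7' ∨ c = '8' ∨ c = '9' := by
  have h1 : '0'.val ≤ c.val ∧ c.val ≤ '9'.val := by
    unfold Char.isDigit at h
    simp only [ge_iff_le, Bool.and_eq_true, decide_eq_true_eq] at h
    exact h
  have hn : 48 ≤ c.val.toNat ∧ c.val.toNat ≤ 57 := by
    obtain ⟨ha, hb⟩ := h1
    exact ⟨UInt32.le_iff_toNat_le.mp ha, UInt32.le_iff_toNat_le.mp hb⟩
  have hcases : c.val.toNat = 48 ∨ c.val.toNat = 49 ∨ c.val.toNat = 50 ∨ c.val.toNat = 51 ∨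
      c.val.toNat = 52 ∨ c.val.toNat = 53 ∨ c.val.toNat = 54 ∨ c.val.toNat = 55 ∨
      c.val.toNat = 56 ∨ c.val.toNat = 57 := by omega
  rcases hcases with h' | h' | h' | h' | h' | h' | h' | h' | h' | h' <;>
    have := charEq (c' := Char.ofNat c.val.toNat) (by rw [h']; decide) <;>
    rw [h'] at this <;> subst this <;> simp

lemma ofChars_digit {c : Char} (h : c.isDigit = true) :
    ∃ k : Nat, k < 10 ∧ PySem.Int.ofChars? [c] = some ((k : Nat) : Int) ∧
      (k = 0 ↔ c = '0') := by
  rcases digit_cases h with rfl | rfl | rfl | rfl | rfl | rfl | rfl | rfl | rfl | rfl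
  · exact ⟨0, by omega, by decide, by simp⟩
  · exact ⟨1, by omega, by decide, by simp⟩
  · exact ⟨2, by omega, by decide, by simp⟩
  · exact ⟨3, by omega, by decide, by simp⟩
  · exact ⟨4, by omega, by decide, by simp⟩
  · exact ⟨5, by omega, by decide, by simp⟩
  · exact ⟨6, by omega, by decide, by simp⟩
  · exact ⟨7, by omega, by decide, by simp⟩
  · exact ⟨8, by omega, by decide, by simp⟩
  · exact ⟨9, by omega, by decide, by simp⟩

lemma digAt_digit {s : String} {i : Nat} (hi : i < s.toList.length)
    (hd : (s.toList[i]).isDigit = true) :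
    ∃ k : Nat, k < 10 ∧ digAt s i = ((k : Nat) : Int) ∧ (k = 0 ↔ s.toList[i] = '0') := by
  obtain ⟨k, hk, hv, h0⟩ := ofChars_digit hd
  refine ⟨k, hk, ?_, h0⟩
  unfold digAt
  rw [PySem.Str.pyGet?_natCast, List.getElem?_eq_getElem hi]
  simp only
  rw [hv]
  rfl

-- in a BPost state every reachable state is set
lemma post_reach_set {n x y : Nat} {d : Nat → Nat} {dist : Nat → Nat → Int}
    (hP : BPost n x y d dist) {u z : Nat × Nat} {k : Nat} (hR : Reach n x y d u k z)
    (hu : dist u.1 u.2 ≠ -1) : dist z.1 z.2 ≠ -1 := by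
  induction hR with
  | refl => exact hu
  | @step u v z w k e _ ih =>
      apply ih
      have hcl := hP.2.1 u hu
      obtain ⟨st, hst, hcase⟩ := e
      rcases hcase with ⟨_, hv⟩ | ⟨_, h1, h2, hv⟩
      · rw [hv]; exact (hcl st hst).1
      · rw [hv]; exact (hcl st hst).2 h1 h2

lemma post_complete {n x y : Nat} {d : Nat → Nat} {dist : Nat → Nat → Int}
    (ctx : Ctx n x y d) (hP : BPost n x y d dist) {p e k : Nat}
    (hp : p < n) (hF : Fv x y d p e = some k) : dist p e = (k : Int) := by
  have hR : Reach n x y d (0, 0) k (p, e) := by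
    have := Fv_realize ctx.hx ctx.hy ctx.hd hp hF
    rwa [ctx.hd0] at this
  have hset : dist p e ≠ -1 := post_reach_set hP hR hP.2.2
  obtain ⟨k', hk', hF', _, _⟩ := hP.1 p e hset
  rw [hF'] at hF
  rw [hk', Option.some_inj.mp hF]

lemma unsetCnt_le (n : Nat) (dist : Nat → Nat → Int) : unsetCnt n dist ≤ 10 * n := by
  unfold unsetCnt
  calc _ ≤ ((Finset.range n) ×ˢ (Finset.range 10)).card := Finset.card_filter_le _ _
    _ = n * 10 := by rw [Finset.card_product, Finset.card_range, Finset.card_range]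
    _ ≤ 10 * n := by omega

lemma init_inv {n x y : Nat} {d : Nat → Nat} (ctx : Ctx n x y d) :
    BInv n x y d (upd2 (fun _ _ => -1) 0 0 0) [(0, 0)] := by
  have hat : upd2 (fun _ _ => -1) 0 0 0 0 0 = 0 := by
    unfold upd2
    rw [if_pos ⟨rfl, rfl⟩]
  have honly : ∀ p e, upd2 (fun _ _ => -1) 0 0 0 p e ≠ -1 → p = 0 ∧ e = 0 := by
    intro p e h
    by_contra hc
    unfold upd2 at h
    rw [if_neg] at h
    · exact h rfl
    · exact hc
  have hF00 : Fv x y d 0 0 = some 0 := by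
    have h := Fv_entry (x := x) (y := y) (d := d) (p := 0) (by rw [ctx.hd0]; omega)
    rw [ctx.hd0] at h
    rw [h]
    rfl
  refine ⟨?_, ?_, ?_, ?_, ?_, ?_, ?_⟩
  · intro p e h
    obtain ⟨rfl, rfl⟩ := honly p e h
    exact ⟨0, hat, hF00, ctx.hn, by omega⟩
  · intro u hu
    rcases List.mem_singleton.mp hu with rfl
    rw [hat]
    simp
  · exact List.pairwise_singleton _ _
  · intro u hset hq
    obtain ⟨h1, h2⟩ := honly u.1 u.2 hset
    exact absurd (List.mem_singleton.mpr (Prod.ext h1 h2)) hq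
  · rw [hat]; simp
  · intro p e h
    obtain ⟨rfl, rfl⟩ := honly p e h
    rw [ctx.hd0, hat]
    simp
  · intro a ha b hb
    rcases List.mem_singleton.mp ha with rfl
    rcases List.mem_singleton.mp hb with rfl
    omega

lemma bestFold (dist : Nat → Nat → Int) (m : Nat) (c : Nat) :
    ∀ (l : List Nat) (b : Int),
      (∀ e ∈ l, dist m e = -1 ∨ ∃ k : Nat, dist m e = (k : Int) ∧ c ≤ k) →
      (b = -1 ∨ ∃ k0 : Nat, b = (k0 : Int) ∧ c ≤ k0) →
      ((∃ e ∈ l, dist m e = (c : Int)) ∨ b = (c : Int)) →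
      l.foldl (fun best e =>
        if dist m e ≠ -1 ∧ (best = -1 ∨ dist m e < best) then dist m e else best) b = (c : Int) := by
  intro l
  induction l with
  | nil =>
      intro b _ _ hwit
      rcases hwit with ⟨e, he, _⟩ | hb
      · exact absurd he (List.not_mem_nil)
      · exact hb
  | cons e l ih =>
      intro b hgood hb hwit
      simp only [List.foldl_cons]
      have hge := hgood e (List.mem_cons_self ..)
      have hgood' : ∀ e' ∈ l, dist m e' = -1 ∨ ∃ k : Nat, dist m e' = (k : Int) ∧ c ≤ k :=
        fun e' he' => hgood e' (List.mem_cons_of_mem _ he')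
      by_cases hcnd : dist m e ≠ -1 ∧ (b = -1 ∨ dist m e < b)
      · rw [if_pos hcnd]
        rcases hge with h | ⟨k, hk, hck⟩
        · exact absurd h hcnd.1
        · apply ih _ hgood' (Or.inr ⟨k, hk, hck⟩)
          rcases hwit with ⟨e0, he0, hve0⟩ | hbc
          · rcases List.mem_cons.mp he0 with rfl | he0'
            · right
              rw [hk] at hve0
              rw [hk, hve0]
            · exact Or.inl ⟨e0, he0', hve0⟩
          · rcases hcnd.2 with h' | h'
            · rw [hbc] at h'
              exact absurd h' (by simp)
            · rw [hbc, hk] at h'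
              right
              rw [hk]
              omega
      · rw [if_neg hcnd]
        apply ih _ hgood' hb
        rcases hwit with ⟨e0, he0, hve0⟩ | hbc
        · rcases List.mem_cons.mp he0 with rfl | he0'
          · right
            rcases hb with rfl | ⟨k0, rfl, hck0⟩
            · exact absurd ⟨by rw [hve0]; simp, Or.inl rfl⟩ hcnd
            · have hnl : ¬ (dist m e0 < (k0 : Int)) := fun hl =>
                hcnd ⟨by rw [hve0]; simp, Or.inr hl⟩
              rw [hve0] at hnl
              omega
          · exact Or.inl ⟨e0, he0', hve0⟩
        · exact Or.inr hbc

lemma bestFold_none (dist : Nat → Nat → Int) (m : Nat) :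
    ∀ (l : List Nat) (b : Int), (∀ e ∈ l, dist m e = -1) →
      l.foldl (fun best e =>
        if dist m e ≠ -1 ∧ (best = -1 ∨ dist m e < best) then dist m e else best) b = b := by
  intro l
  induction l with
  | nil => intro b _; rfl
  | cons e l ih =>
      intro b hall
      simp only [List.foldl_cons]
      rw [if_neg (by
        intro hc
        exact hc.1 (hall e (List.mem_cons_self ..)))]
      exact ih b (fun e' he' => hall e' (List.mem_cons_of_mem _ he'))

lemma pairAns_main {s : String} {n x y : Nat} {d : Nat → Nat}
    (ctx : Ctx n x y d) (Hd : ∀ i, i < n → digAt s i = ((d i : Nat) : Int))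
    (hA0 : digAt s 0 = 0) :
    pairAns s n x y = (match Bcost x y d (n - 1) with
      | some c => (c : Int)
      | none => -1) := by
  unfold pairAns
  rw [hA0]
  rw [if_neg (by simp)]
  have hfuel : (1 : Nat) + unsetCnt n (upd2 (fun _ _ => -1) 0 0 0) ≤ 10 * n + 1 := by
    have := unsetCnt_le n (upd2 (fun _ _ => -1) 0 0 0)
    omega
  have hpost := bfs_post ctx Hd (10 * n + 1) (upd2 (fun _ _ => -1) 0 0 0) [(0, 0)]
    (init_inv ctx) (by simpa using hfuel)
  set dist := bfs s n x y (10 * n + 1) (upd2 (fun _ _ => -1) 0 0 0) [(0, 0)] with hdist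
  have hn1 : n - 1 < n := by have := ctx.hn; omega
  cases hB : Bcost x y d (n - 1) with
  | none =>
      have hall : ∀ e ∈ List.range 10, dist (n - 1) e = -1 := by
        intro e _
        by_contra hset
        obtain ⟨k, _, hF, _, _⟩ := hpost.1 (n - 1) e hset
        obtain ⟨c', t, hBc, _, _⟩ := Fv_some_elim hF
        rw [hB] at hBc
        cases hBc
      exact bestFold_none dist (n - 1) (List.range 10) (-1) hall
  | some c =>
      have hgood : ∀ e ∈ List.range 10,
          dist (n - 1) e = -1 ∨ ∃ k : Nat, dist (n - 1) e = (k : Int) ∧ c ≤ k := by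
        intro e _
        by_cases hset : dist (n - 1) e = -1
        · exact Or.inl hset
        · obtain ⟨k, hk, hF, _, _⟩ := hpost.1 (n - 1) e hset
          obtain ⟨c', t, hBc, _, hkct⟩ := Fv_some_elim hF
          rw [hB] at hBc
          cases hBc
          exact Or.inr ⟨k, hk, by omega⟩
      have hwit : dist (n - 1) (d (n - 1)) = (c : Int) := by
        apply post_complete ctx hpost hn1
        rw [Fv_entry (ctx.hd _ hn1), hB]
      exact bestFold dist (n - 1) c (List.range 10) (-1) hgood (Or.inl rfl)
        (Or.inl ⟨d (n - 1), List.mem_range.mpr (ctx.hd _ hn1), hwit⟩)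

def natIter (x y : Nat) : Nat → Nat → Nat → Option Nat
  | 0, a, b => if a = b then some 0 else none
  | r + 1, a, b =>
      if a = b then some 0
      else ominN ((natIter x y r a (pre10 b x)).map (· + 1))
                 ((natIter x y r a (pre10 b y)).map (· + 1))

lemma pre10_lt (b st : Nat) : pre10 b st < 10 := by unfold pre10; omega

lemma mdist_det {x y a b : Nat} {j j' : Nat} (h : mdist x y a b = some j)
    (h' : mdist x y a b = some j') : j = j' := by
  rw [h] at h'
  exact Option.some_inj.mp h'

lemma ominN_eq_some {u v : Option Nat} {j : Nat} (h : u = some j ∨ v = some j)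
    (hu : ∀ w, u = some w → j ≤ w) (hv : ∀ w, v = some w → j ≤ w) : ominN u v = some j := by
  cases u <;> cases v <;> simp_all [ominN] <;> omega

lemma natIter_iff {x y : Nat} (hx : x < 10) (hy : y < 10) :
    ∀ (r : Nat) {a b j : Nat}, a < 10 → b < 10 →
      (natIter x y r a b = some j ↔ (mdist x y a b = some j ∧ j ≤ r)) := by
  intro r
  induction r with
  | zero =>
      intro a b j ha hb
      constructor
      · intro h
        by_cases hab : a = b
        · subst hab
          have hj0 : j = 0 := by
            simp [natIter] at h
            omega
          subst hj0
          exact ⟨mdist_self x y ha, le_refl _⟩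
        · exact absurd h (by simp [natIter, hab])
      · rintro ⟨hm, hj⟩
        have hj0 : j = 0 := by omega
        subst hj0
        have hba := mdist_eq_zero ha hm
        subst hba
        simp [natIter]
  | succ r ih =>
      intro a b j ha hb
      by_cases hab : a = b
      · subst hab
        constructor
        · intro h
          have hj0 : j = 0 := by
            simp [natIter] at h
            omega
          subst hj0
          exact ⟨mdist_self x y ha, by omega⟩
        · rintro ⟨hm, _⟩
          have : j = 0 := mdist_det hm (mdist_self x y ha)
          subst this
          simp [natIter]
      · have hexp : natIter x y (r + 1) a b =
            ominN ((natIter x y r a (pre10 b x)).map (· + 1))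
                  ((natIter x y r a (pre10 b y)).map (· + 1)) := by
          rw [natIter, if_neg hab]
        constructor
        · intro h
          rw [hexp] at h
          obtain ⟨st, hst, w, hw, rfl⟩ : ∃ st, (st = x ∨ st = y) ∧ ∃ w,
              natIter x y r a (pre10 b st) = some w ∧ j = w + 1 := by
            rcases ominN_cases h with h' | h'
            · obtain ⟨w, hw1, hw2⟩ := Option.map_eq_some_iff.mp h'
              exact ⟨x, Or.inl rfl, w, hw1, hw2.symm⟩
            · obtain ⟨w, hw1, hw2⟩ := Option.map_eq_some_iff.mp h'
              exact ⟨y, Or.inr rfl, w, hw1, hw2.symm⟩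
          have hst10 : st < 10 := by rcases hst with rfl | rfl <;> assumption
          obtain ⟨hmw, hwr⟩ := (ih ha (pre10_lt b st)).mp hw
          obtain ⟨j'', hj''le, hm''⟩ := mdist_triangle hst hmw
          rw [pre10_spec hb hst10] at hm''
          have hj'' : j'' = w + 1 := by
            by_contra hne
            have hlt : j'' < w + 1 := by omega
            rcases j'' with _ | jj
            · exact hab (mdist_eq_zero ha hm'').symm
            · obtain ⟨st2, hst2, b2, hb2, hm2⟩ := mdist_pred hm''
              have hb2lt : b2 < 10 := mdist_lt10 ha hm2
              have hst2lt : st2 < 10 := by rcases hst2 with rfl | rfl <;> assumption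
              have hpre2 : pre10 b st2 = b2 := pre10_inv hb2lt hst2lt hb2.symm
              have hni : natIter x y r a (pre10 b st2) = some jj := by
                refine (ih ha (pre10_lt b st2)).mpr ⟨?_, by omega⟩
                rw [hpre2]
                exact hm2
              have hmap : (natIter x y r a (pre10 b st2)).map (· + 1) = some (jj + 1) := by
                rw [hni]; rfl
              have hle := ominN_le h
              rcases hst2 with rfl | rfl
              · have := hle.1 _ hmap
                omega
              · have := hle.2 _ hmap
                omega
          rw [hj''] at hm''
          exact ⟨hm'', by omega⟩
        · rintro ⟨hm, hjle⟩
          rcases j with _ | jj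
          · exact absurd (mdist_eq_zero ha hm).symm hab
          · obtain ⟨st, hst, b', hb', hm'⟩ := mdist_pred hm
            have hb'lt : b' < 10 := mdist_lt10 ha hm'
            have hst10 : st < 10 := by rcases hst with rfl | rfl <;> assumption
            have hpre : pre10 b st = b' := pre10_inv hb'lt hst10 hb'.symm
            have hni : natIter x y r a (pre10 b st) = some jj := by
              refine (ih ha (pre10_lt b st)).mpr ⟨?_, by omega⟩
              rw [hpre]
              exact hm'
            have hmap : (natIter x y r a (pre10 b st)).map (· + 1) = some (jj + 1) := by
              rw [hni]; rfl
            have hbound : ∀ st2, (st2 = x ∨ st2 = y) → ∀ w,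
                (natIter x y r a (pre10 b st2)).map (· + 1) = some w → jj + 1 ≤ w := by
              intro st2 hst2 w hmapw
              obtain ⟨w', hw', rfl⟩ := Option.map_eq_some_iff.mp hmapw
              obtain ⟨hmw', _⟩ := (ih ha (pre10_lt b st2)).mp hw'
              have hst2lt : st2 < 10 := by rcases hst2 with rfl | rfl <;> assumption
              obtain ⟨j2, hj2le, hmj2⟩ := mdist_triangle hst2 hmw'
              rw [pre10_spec hb hst2lt] at hmj2
              have := mdist_det hm hmj2
              omega
            rw [hexp]
            apply ominN_eq_some
            · rcases hst with h | h
              · left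
                rw [h] at hmap
                exact hmap
              · right
                rw [h] at hmap
                exact hmap
            · exact fun w hw => hbound x (Or.inl rfl) w hw
            · exact fun w hw => hbound y (Or.inr rfl) w hw

lemma natIter10_eq {x y : Nat} (hx : x < 10) (hy : y < 10) {a b : Nat}
    (ha : a < 10) (hb : b < 10) : natIter x y 10 a b = mdist x y a b := by
  cases hm : mdist x y a b with
  | some j =>
      exact (natIter_iff hx hy 10 ha hb).mpr ⟨hm, by have := mdist_le9 hm; omega⟩
  | none =>
      cases hni : natIter x y 10 a b with
      | none => rfl
      | some j =>
          have := ((natIter_iff hx hy 10 ha hb).mp hni).1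
          rw [hm] at this
          cases this

def tblOf (g : Nat → Nat → Option Int) : List (List (Option Int)) :=
  (List.range 10).map (fun a => (List.range 10).map (fun b => g a b))

lemma tget_tblOf (g : Nat → Nat → Option Int) {a b : Nat} (ha : a < 10) (hb : b < 10) :
    tget (tblOf g) a b = g a b := by
  simp [tget, tblOf, List.getD_eq_getElem?_getD, ha, hb]

lemma subMod10_eq {b st : Nat} (hb : b < 10) (hst : st < 10) :
    subMod10 b st = pre10 b st := by
  interval_cases b <;> interval_cases st <;> decide

lemma bump_map (o : Option Nat) :
    bump (o.map (Nat.cast : Nat → Int)) = (o.map (fun k : Nat => k + 1)).map (Nat.cast : Nat → Int) := by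
  cases o <;> simp [bump]

lemma optMin_map (u v : Option Nat) :
    optMin (u.map (Nat.cast : Nat → Int)) (v.map (Nat.cast : Nat → Int)) =
      (ominN u v).map (Nat.cast : Nat → Int) := by
  cases u with
  | none => cases v <;> rfl
  | some a =>
      cases v with
      | none => rfl
      | some b =>
          show (if (a : Int) ≤ (b : Int) then some ((a : Int)) else some ((b : Int))) =
            some ((min a b : Nat) : Int)
          by_cases hab : a ≤ b
          · rw [if_pos (by exact_mod_cast hab)]
            congr 1
            exact_mod_cast (Nat.min_eq_left hab).symm
          · rw [if_neg (by exact_mod_cast hab)]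
            congr 1
            exact_mod_cast (Nat.min_eq_right (by omega)).symm

lemma tblOf_ext {g1 g2 : Nat → Nat → Option Int}
    (h : ∀ a, a < 10 → ∀ b, b < 10 → g1 a b = g2 a b) : tblOf g1 = tblOf g2 := by
  unfold tblOf
  apply List.map_congr_left
  intro a hamem
  apply List.map_congr_left
  intro b hbmem
  exact h a (List.mem_range.mp hamem) b (List.mem_range.mp hbmem)

lemma stepsTable_round {x y : Nat} (hx : x < 10) (hy : y < 10) (r : Nat) :
    (List.range r).foldl
      (fun m _ =>
        (List.range 10).map (fun a => (List.range 10).map (fun b =>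
          if a = b then some (0 : Int)
          else optMin (bump (tget m a (subMod10 b x))) (bump (tget m a (subMod10 b y))))))
      ((List.range 10).map (fun a => (List.range 10).map (fun b =>
        if a = b then some (0 : Int) else none))) =
    tblOf (fun a b => (natIter x y r a b).map (Nat.cast : Nat → Int)) := by
  induction r with
  | zero =>
      show tblOf _ = tblOf _
      apply tblOf_ext
      intro a _ b _
      by_cases hab : a = b <;> simp [natIter, hab]
  | succ r ih =>
      rw [show List.range (r + 1) = List.range r ++ [r] from List.range_succ, List.foldl_append, ih]
      simp only [List.foldl_cons, List.foldl_nil]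
      show tblOf _ = tblOf _
      apply tblOf_ext
      intro a ha b hb
      by_cases hab : a = b
      · rw [if_pos hab]
        rw [show natIter x y (r + 1) a b = some 0 by subst hab; simp [natIter]]
        rfl
      · rw [if_neg hab]
        rw [subMod10_eq hb hx, subMod10_eq hb hy]
        rw [tget_tblOf _ ha (pre10_lt b x), tget_tblOf _ ha (pre10_lt b y)]
        rw [bump_map, bump_map, optMin_map]
        rw [natIter, if_neg hab]

lemma stepsTable_eq {x y : Nat} (hx : x < 10) (hy : y < 10) {a b : Nat}
    (ha : a < 10) (hb : b < 10) :
    tget (stepsTable x y) a b = (mdist x y a b).map (Nat.cast : Nat → Int) := by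
  unfold stepsTable
  rw [stepsTable_round hx hy 10, tget_tblOf _ ha hb, natIter10_eq hx hy ha hb]

lemma intmod_pre10 {b st : Nat} (hb : b < 10) (hst : st < 10) :
    (PySem.Int.mod (((b : Nat) : Int) - ((st : Nat) : Int)) 10).toNat = pre10 b st := by
  interval_cases b <;> interval_cases st <;> decide

lemma digs_getD {s : String} {i : Nat} (hi : i < s.toList.length) :
    (s.toList.map (fun c => (PySem.Int.ofChars? [c]).getD 0)).getD i 0 = digAt s i := by
  rw [List.getD_eq_getElem?_getD, List.getElem?_map, List.getElem?_eq_getElem hi]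
  unfold digAt
  rw [PySem.Str.pyGet?_natCast, List.getElem?_eq_getElem hi]
  rfl

lemma altFold {x y : Nat} {d : Nat → Nat} {n : Nat} (ctx : Ctx n x y d)
    (digs : List Int) (hdigs : ∀ i, i < n → digs.getD i 0 = ((d i : Nat) : Int)) :
    ∀ m, 1 ≤ m → m ≤ n →
      (PySem.List.pyRange 1 ((m : Nat) : Int) 1).foldl
        (fun (acc : Option Int) (p : Int) =>
          match acc with
          | none => none
          | some c =>
            match optMin
                (tget (stepsTable x y) (digs.getD (p - 1).toNat 0).toNat
                  ((PySem.Int.mod (digs.getD p.toNat 0 - (x : Int)) 10).toNat))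
                (tget (stepsTable x y) (digs.getD (p - 1).toNat 0).toNat
                  ((PySem.Int.mod (digs.getD p.toNat 0 - (y : Int)) 10).toNat)) with
            | none => none
            | some t => some (c + t))
        (some 0)
      = (Bcost x y d (m - 1)).map (Nat.cast : Nat → Int) := by
  intro m
  induction m with
  | zero => intro h; omega
  | succ m' ih =>
      intro _ hmn
      rcases Nat.eq_zero_or_pos m' with rfl | hm'
      · rw [PySem.List.pyRange_one_eq_nil (by norm_num)]
        rfl
      · have hm'n : m' < n := by omega
        have hsplit : PySem.List.pyRange 1 ((m' + 1 : Nat) : Int) 1 =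
            PySem.List.pyRange 1 ((m' : Nat) : Int) 1 ++ [((m' : Nat) : Int)] := by
          rw [show ((m' + 1 : Nat) : Int) = ((m' : Nat) : Int) + 1 by push_cast; ring]
          exact PySem.List.pyRange_one_succ_right (by exact_mod_cast hm')
        rw [hsplit, List.foldl_append, ih hm' (by omega)]
        simp only [List.foldl_cons, List.foldl_nil]
        have hidx1 : (((m' : Nat) : Int) - 1).toNat = m' - 1 := by omega
        have hidx2 : (((m' : Nat) : Int)).toNat = m' := by omega
        have hd1 : digs.getD (m' - 1) 0 = ((d (m' - 1) : Nat) : Int) := hdigs _ (by omega)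
        have hd2 : digs.getD m' 0 = ((d m' : Nat) : Int) := hdigs _ hm'n
        have hmod : ∀ st : Nat, st < 10 →
            ((PySem.Int.mod (digs.getD m' 0 - ((st : Nat) : Int)) 10).toNat) =
              pre10 (d m') st := by
          intro st hst
          rw [hd2]
          exact intmod_pre10 (ctx.hd _ hm'n) hst
        cases hB : Bcost x y d (m' - 1) with
        | none =>
            rw [show m' + 1 - 1 = (m' - 1) + 1 by omega]
            rw [show Bcost x y d ((m' - 1) + 1) =
              (Bcost x y d (m' - 1)).bind
                (fun c => (tcost x y d (m' - 1)).map (fun t => c + t)) from rfl, hB]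
            rfl
        | some c =>
            rw [Option.map_some]
            rw [hidx1, hidx2, hd1]
            rw [hmod x ctx.hx, hmod y ctx.hy]
            rw [show (((d (m' - 1) : Nat) : Int)).toNat = d (m' - 1) by omega]
            rw [stepsTable_eq ctx.hx ctx.hy (ctx.hd _ (by omega)) (pre10_lt _ _),
                stepsTable_eq ctx.hx ctx.hy (ctx.hd _ (by omega)) (pre10_lt _ _)]
            rw [optMin_map]
            have htc : ominN (mdist x y (d (m' - 1)) (pre10 (d m') x))
                (mdist x y (d (m' - 1)) (pre10 (d m') y)) = tcost x y d (m' - 1) := by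
              unfold tcost
              rw [show m' - 1 + 1 = m' by omega]
            rw [htc]
            rw [show m' + 1 - 1 = (m' - 1) + 1 by omega]
            rw [show Bcost x y d ((m' - 1) + 1) =
              (Bcost x y d (m' - 1)).bind
                (fun c => (tcost x y d (m' - 1)).map (fun t => c + t)) from rfl, hB]
            cases htcv : tcost x y d (m' - 1) with
            | none => rfl
            | some t =>
                show some ((c : Int) + (t : Int)) = some (((c + t : Nat)) : Int)
                exact congrArg some (by push_cast; ring)

-- ===== VERDICT (by name: the statement is the Claim_ definition above) =====
theorem solve_spec : Claim_equal_solve := by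
  intro s _ hpre
  unfold Spec_solve
  obtain ⟨hne, hhd, hall0⟩ := hpre
  obtain ⟨c, rest, hL⟩ : ∃ c rest, s.toList = c :: rest := by
    cases hLl : s.toList with
    | nil => exact absurd hLl hne
    | cons a l => exact ⟨a, l, rfl⟩
  have hn : 0 < s.toList.length := by rw [hL]; simp
  have hheadD : s.toList.headD ' ' = c := by rw [hL]; rfl
  have hc0 : s.toList[0]'hn = c := by simp [hL]
  have hcdig : c.isDigit = true := by rw [hheadD] at hhd; exact hhd
  obtain ⟨k0, hk0lt, hA0v, hk0iff⟩ := digAt_digit hn (by rw [hc0]; exact hcdig)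
  simp only [solve, solve_alt]
  by_cases hc : c = '0'
  · -- main case: first digit is 0
    have hk00 : k0 = 0 := hk0iff.mpr (hc0 ▸ hc)
    have hA0 : digAt s 0 = 0 := by rw [hA0v, hk00]; rfl
    rw [if_neg (by rw [hA0]; simp)]
    have hall : ∀ ch ∈ s.toList, ch.isDigit = true :=
      List.all_eq_true.mp (hall0 (by rw [hheadD]; exact hc))
    set d : Nat → Nat := fun i => (digAt s i).toNat with hdDef
    have Hd : ∀ i, i < s.toList.length → digAt s i = ((d i : Nat) : Int) ∧ d i < 10 := by
      intro i hi
      obtain ⟨k, hklt, hv, _⟩ := digAt_digit hi (hall _ (List.getElem_mem _))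
      have hdi : d i = k := by rw [hdDef]; simp only; rw [hv]; omega
      exact ⟨by rw [hv, hdi], by omega⟩
    have hd0 : d 0 = 0 := by rw [hdDef]; simp only; rw [hA0]; rfl
    apply List.map_congr_left
    intro x hx
    apply List.map_congr_left
    intro y hy
    have hx10 : x < 10 := List.mem_range.mp hx
    have hy10 : y < 10 := List.mem_range.mp hy
    have ctx : Ctx s.toList.length x y d :=
      ⟨hx10, hy10, fun i hi => (Hd i hi).2, hd0, hn⟩
    rw [pairAns_main ctx (fun i hi => (Hd i hi).1) hA0]
    have hdigs : ∀ i, i < s.toList.length →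
        (s.toList.map (fun ch => (PySem.Int.ofChars? [ch]).getD 0)).getD i 0 =
          ((d i : Nat) : Int) := by
      intro i hi
      rw [digs_getD hi]
      exact (Hd i hi).1
    rw [altFold ctx _ hdigs s.toList.length hn (le_refl _)]
    cases Bcost x y d (s.toList.length - 1) <;> rfl
  · -- first digit nonzero: every pair is -1
    have hk0ne : k0 ≠ 0 := fun h => hc (hc0 ▸ hk0iff.mp h)
    have hA0ne : digAt s 0 ≠ 0 := by
      rw [hA0v]
      exact_mod_cast hk0ne
    rw [if_pos hA0ne]
    apply List.map_congr_left
    intro x _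
    apply List.map_congr_left
    intro y _
    show pairAns s s.toList.length x y = -1
    unfold pairAns
    rw [if_pos hA0ne]
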